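-- pv_equiv track=rewrite | github.com/o4863556-a11y/Judge-Assistant | Summerize/node_3.py | resolve_sources
-- ===== SOURCE A (Python) =====
-- from typing import List, Dict, Any
--
-- def resolve_sources(bullet_ids: List[str], lookup: dict) -> List[str]:
--     """Merge source lists from all referenced bullet_ids, deduped."""
--     sources = []
--     seen = set()
--     for bid in bullet_ids:
--         if bid not in lookup:
--             continue
--         for src in lookup[bid].get("source", []):
--             if src not in seen:
--                 seen.add(src)
--                 sources.append(src)
--     return sources
-- ===== SOURCE B (Python) =====
-- def resolve_sources(bullet_ids, lookup):
--     """Merge source lists from all referenced bullet_ids, deduped.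
--
--     Divide and conquer: resolve each half of bullet_ids recursively, then merge
--     by keeping the left result and appending the right result's entries that the
--     left does not already contain.
--     """
--     def solve(lo, hi):
--         if hi - lo == 0:
--             return []
--         if hi - lo == 1:
--             bid = bullet_ids[lo]
--             head = lookup[bid].get("source", []) if bid in lookup else []
--             return list(dict.fromkeys(head))
--         mid = (lo + hi) // 2
--         left = solve(lo, mid)
--         right = solve(mid, hi)
--         lset = set(left)
--         return left + [s for s in right if s not in lset]
--     return solve(0, len(bullet_ids))
-- ===== Notes on version B (the rewrite author's own statement) =====
-- stated objective: alternative
-- what changed: Replaces the single linear pass with a seen-set by a divide-and-conquer recursion: split bullet_ids, resolve each half recursively (deduping one bullet's sources at the leaves), and merge halves by appending the right result's entries absent from the left result.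
import Mathlib
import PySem

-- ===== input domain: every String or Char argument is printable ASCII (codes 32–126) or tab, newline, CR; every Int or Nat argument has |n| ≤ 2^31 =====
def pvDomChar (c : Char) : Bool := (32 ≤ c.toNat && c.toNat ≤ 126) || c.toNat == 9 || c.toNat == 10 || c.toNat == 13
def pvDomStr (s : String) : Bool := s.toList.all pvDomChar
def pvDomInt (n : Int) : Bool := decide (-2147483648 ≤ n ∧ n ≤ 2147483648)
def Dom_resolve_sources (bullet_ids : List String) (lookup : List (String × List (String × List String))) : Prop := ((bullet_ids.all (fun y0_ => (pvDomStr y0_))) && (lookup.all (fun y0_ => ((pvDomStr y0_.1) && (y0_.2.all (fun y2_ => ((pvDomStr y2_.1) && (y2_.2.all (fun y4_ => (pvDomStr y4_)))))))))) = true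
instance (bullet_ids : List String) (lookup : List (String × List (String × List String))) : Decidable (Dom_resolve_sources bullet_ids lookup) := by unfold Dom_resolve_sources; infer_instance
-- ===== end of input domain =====

-- ===== PORT A =====
-- B resolves by divide and conquer: split bullet_ids, recurse on each half, merge by appending the right half's entries absent from the left (alternative algorithm, not faster).
-- Literal port of A: seen-set + append inside a nested loop.
def resolve_sources (bullet_ids : List String) (lookup : List (String × List (String × List String))) : List String :=
  let st := bullet_ids.foldl (fun (st : List String × PySem.Set String) bid =>
    if (PySem.Dict.mk lookup).contains bid = false then st
    else
      (PySem.Dict.getD (PySem.Dict.mk (((PySem.Dict.mk lookup).get? bid).getD [])) "source" []).foldl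
        (fun (st : List String × PySem.Set String) src =>
          if PySem.Set.contains st.2 src then st
          else (st.1 ++ [src], PySem.Set.add st.2 src)) st) ([], PySem.Set.empty)
  st.1

-- ===== PORT B =====
-- solve(lo, hi): divide-and-conquer resolution of bullet_ids[lo:hi].
-- The 'none' branch of bids[lo]? is unreachable (every call keeps lo < bids.length).
def pvSolve (lookup : List (String × List (String × List String))) (bids : List String)
    (lo hi : Nat) : List String :=
  if hi - lo = 0 then []
  else if hi - lo = 1 then
    match bids[lo]? with
    | some bid =>
      let head : List String :=
        if (PySem.Dict.mk lookup).contains bid then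
          PySem.Dict.getD (PySem.Dict.mk (((PySem.Dict.mk lookup).get? bid).getD [])) "source" []
        else []
      PySem.List.dedup head
    | none => []
  else
    let mid := (lo + hi) / 2
    let left := pvSolve lookup bids lo mid
    let right := pvSolve lookup bids mid hi
    left ++ right.filter (fun s => !left.contains s)
termination_by hi - lo
decreasing_by all_goals omega

def resolve_sources_alt (bullet_ids : List String) (lookup : List (String × List (String × List String))) : List String :=
  pvSolve lookup bullet_ids 0 bullet_ids.length

-- ===== PRECONDITION & SPEC =====
def Spec_resolve_sources (bullet_ids : List String) (lookup : List (String × List (String × List String))) (out : List String) : Prop := out = resolve_sources_alt bullet_ids lookup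
instance (bullet_ids : List String) (lookup : List (String × List (String × List String))) (out : List String) : Decidable (Spec_resolve_sources bullet_ids lookup out) := by unfold Spec_resolve_sources; infer_instance

-- ===== CLAIM (what is proved, stated in full; the proofs are below) =====
def Claim_equal_resolve_sources : Prop := ∀ (bullet_ids : List String) (lookup : List (String × List (String × List String))), Dom_resolve_sources bullet_ids lookup → Spec_resolve_sources bullet_ids lookup (resolve_sources bullet_ids lookup)

-- ===== LEMMAS AND PROOFS =====

theorem rs_mem_add_of_mem (s : PySem.Set String) (x y : String) (h : x ∈ s) :
    x ∈ PySem.Set.add s y := by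
  unfold PySem.Set.add
  split
  · exact h
  · exact List.mem_append.mpr (Or.inl h)

-- A's inner loop from a state whose sources list and seen set coincide is Set.add folded over the sources.
theorem rs_inner (srcs : List String) (s : PySem.Set String) :
    srcs.foldl (fun (st : List String × PySem.Set String) src =>
        if PySem.Set.contains st.2 src then st
        else (st.1 ++ [src], PySem.Set.add st.2 src)) (s, s)
    = (srcs.foldl PySem.Set.add s, srcs.foldl PySem.Set.add s) := by
  induction srcs generalizing s with
  | nil => rfl
  | cons x xs ih =>
    simp only [List.foldl_cons]
    by_cases h : PySem.Set.contains s x = true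
    · rw [if_pos h]
      rw [PySem.Set.add_of_mem ((PySem.Set.contains_iff _ _).mp h), ih]
    · rw [if_neg h]
      rw [PySem.Set.add_of_not_mem (fun hm => h (((PySem.Set.contains_iff _ _).mpr hm))), ih]

-- A's outer loop, phrased through the per-bullet source list g.
theorem rs_outerA (g : String → List String) (bids : List String) (s : PySem.Set String) :
    bids.foldl (fun (st : List String × PySem.Set String) bid =>
        (g bid).foldl (fun (st : List String × PySem.Set String) src =>
          if PySem.Set.contains st.2 src then st
          else (st.1 ++ [src], PySem.Set.add st.2 src)) st) (s, s)
    = (bids.foldl (fun s bid => (g bid).foldl PySem.Set.add s) s,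
       bids.foldl (fun s bid => (g bid).foldl PySem.Set.add s) s) := by
  induction bids generalizing s with
  | nil => rfl
  | cons b bs ih =>
    simp only [List.foldl_cons]
    rw [rs_inner, ih]

-- Folding Set.add over a flattened accumulation equals the nested fold of Set.add.
theorem rs_flatten (g : String → List String) (bids : List String) (acc : List String)
    (s : PySem.Set String) :
    (bids.foldl (fun (a : List String) bid => a ++ g bid) acc).foldl PySem.Set.add s
    = bids.foldl (fun s bid => (g bid).foldl PySem.Set.add s) (acc.foldl PySem.Set.add s) := by
  induction bids generalizing acc with
  | nil => rfl
  | cons b bs ih =>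
    simp only [List.foldl_cons]
    rw [ih, List.foldl_append]

theorem rs_foldl_append_eq_flatMap (g : String → List String) (bids : List String) (acc : List String) :
    bids.foldl (fun (a : List String) bid => a ++ g bid) acc = acc ++ bids.flatMap g := by
  induction bids generalizing acc with
  | nil => simp
  | cons b bs ih => simp [List.foldl_cons, ih]

-- Skipping elements already in the set: folding add over ys is folding over ys with x removed, when x ∈ s.
theorem rs_skip_mem (ys : List String) (s : PySem.Set String) (x : String) (hx : x ∈ s) :
    ys.foldl PySem.Set.add s = (ys.filter (fun y => y != x)).foldl PySem.Set.add s := by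
  induction ys generalizing s with
  | nil => rfl
  | cons y ys ih =>
    by_cases h : y = x
    · subst h
      rw [List.filter_cons_of_neg (by simp), List.foldl_cons, PySem.Set.add_of_mem hx]
      exact ih _ hx
    · have hb : (y != x) = true := bne_iff_ne.mpr h
      simp only [List.filter_cons, hb, if_true, List.foldl_cons]
      exact ih _ (rs_mem_add_of_mem _ _ _ hx)

-- Pulling a fresh head element out of the fold: x never recurs in ys.
theorem rs_cons_out (ys : List String) (s : PySem.Set String) (x : String) (hx : x ∉ ys) :
    ys.foldl PySem.Set.add (x :: s) = x :: ys.foldl PySem.Set.add s := by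
  induction ys generalizing s with
  | nil => rfl
  | cons y ys ih =>
    have hyx : y ≠ x := fun h => hx (h ▸ List.mem_cons_self ..)
    have hstep : PySem.Set.add (x :: s) y = x :: PySem.Set.add s y := by
      have hc : PySem.Set.contains (x :: s) y = PySem.Set.contains s y := by
        simp only [PySem.Set.contains, List.contains_cons]
        have : (y == x) = false := beq_eq_false_iff_ne.mpr hyx
        rw [this, Bool.false_or]
      unfold PySem.Set.add
      rw [hc]
      split <;> simp
    simp only [List.foldl_cons, hstep]
    exact ih _ (fun h => hx (List.mem_cons_of_mem _ h))

theorem rs_ofList_cons (x : String) (xs : List String) :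
    PySem.Set.ofList (x :: xs) = x :: PySem.Set.ofList (xs.filter (fun y => y != x)) := by
  have hx1 : x ∈ ([x] : List String) := List.mem_singleton.mpr rfl
  have hnm : x ∉ xs.filter (fun y => y != x) := by
    intro h
    have := List.of_mem_filter h
    simp at this
  rw [PySem.Set.ofList_eq_foldl, PySem.Set.ofList_eq_foldl, List.foldl_cons]
  have hadd : PySem.Set.add ([] : PySem.Set String) x = [x] := rfl
  rw [hadd, rs_skip_mem _ _ _ hx1]
  have : ([x] : List String) = x :: ([] : List String) := rfl
  rw [this, rs_cons_out _ _ _ hnm]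

theorem rs_fold_filter_fuel : ∀ (n : Nat) (t : List String), t.length ≤ n →
    ∀ (s : PySem.Set String), t.foldl PySem.Set.add s
      = s ++ (PySem.Set.ofList t).filter (fun y => !s.contains y) := by
  intro n
  induction n with
  | zero =>
    intro t h s
    have : t = [] := List.eq_nil_of_length_eq_zero (Nat.le_zero.mp h)
    subst this
    simp [PySem.Set.ofList]
  | succ n ih =>
    intro t h s
    match t with
    | [] => simp [PySem.Set.ofList]
    | y :: t' =>
      have hlen : (t'.filter (fun z => z != y)).length ≤ n :=
        Nat.le_trans (List.length_filter_le _ _) (Nat.le_of_succ_le_succ h)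
      rw [List.foldl_cons, rs_ofList_cons]
      by_cases hy : y ∈ s
      · rw [PySem.Set.add_of_mem hy, rs_skip_mem _ _ _ hy, ih _ hlen]
        simp [hy]
      · have hy2 : y ∈ s ++ [y] := List.mem_append.mpr (Or.inr (List.mem_singleton.mpr rfl))
        rw [PySem.Set.add_of_not_mem hy, rs_skip_mem _ _ _ hy2, ih _ hlen]
        have hfc : (PySem.Set.ofList (t'.filter (fun z => z != y))).filter
              (fun z => !(s ++ [y]).contains z)
            = (PySem.Set.ofList (t'.filter (fun z => z != y))).filter (fun z => !s.contains z) := by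
          apply List.filter_congr
          intro z hz
          have hzne : z ≠ y := by
            have hz' : z ∈ t'.filter (fun z => z != y) := (PySem.Set.mem_ofList _ _).mp hz
            have := List.of_mem_filter hz'
            simpa using this
          simp [hzne]
        rw [hfc]
        simp [hy]

theorem rs_fold_filter (t : List String) (s : PySem.Set String) :
    t.foldl PySem.Set.add s = s ++ (PySem.Set.ofList t).filter (fun y => !s.contains y) :=
  rs_fold_filter_fuel t.length t (Nat.le_refl _) s

-- Ordered dedup of a concatenation: left's dedup, then right's fresh entries.
theorem rs_ofList_append (u v : List String) :
    PySem.Set.ofList (u ++ v)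
      = PySem.Set.ofList u ++ (PySem.Set.ofList v).filter (fun y => !(PySem.Set.ofList u).contains y) := by
  rw [PySem.Set.ofList_eq_foldl, List.foldl_append, ← PySem.Set.ofList_eq_foldl, rs_fold_filter]

-- pvSolve computes the ordered dedup of the flattened sources of bids[lo:hi].
theorem rs_solve_eq (g : String → List String) (lookup : List (String × List (String × List String)))
    (hg : ∀ bid, (if (PySem.Dict.mk lookup).contains bid then
        PySem.Dict.getD (PySem.Dict.mk (((PySem.Dict.mk lookup).get? bid).getD [])) "source" []
      else []) = g bid) :
    ∀ (n : Nat) (bids : List String) (lo hi : Nat), hi - lo ≤ n → hi ≤ bids.length →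
      pvSolve lookup bids lo hi = PySem.Set.ofList (((bids.drop lo).take (hi - lo)).flatMap g) := by
  intro n
  induction n with
  | zero =>
    intro bids lo hi hn _
    have h0 : hi - lo = 0 := Nat.le_zero.mp hn
    rw [pvSolve, if_pos h0, h0]
    rfl
  | succ n ih =>
    intro bids lo hi hn hlen
    by_cases h0 : hi - lo = 0
    · rw [pvSolve, if_pos h0, h0]
      rfl
    · by_cases h1 : hi - lo = 1
      · have hlo : lo < bids.length := by omega
        rw [pvSolve, if_neg h0, if_pos h1, h1]
        rw [List.getElem?_eq_getElem hlo]
        have hseg : (bids.drop lo).take 1 = [bids[lo]] := by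
          rw [List.drop_eq_getElem_cons hlo]
          rfl
        rw [hseg]
        simp only [List.flatMap_cons, List.flatMap_nil, List.append_nil]
        simp only [hg]
        rw [PySem.List.dedup_eq_ofList]
      · rw [pvSolve, if_neg h0, if_neg h1]
        dsimp only
        have hmid1 : (lo + hi) / 2 - lo ≤ n := by omega
        have hmid2 : hi - (lo + hi) / 2 ≤ n := by omega
        have hmidlen : (lo + hi) / 2 ≤ bids.length := by omega
        rw [ih bids lo ((lo + hi) / 2) hmid1 hmidlen, ih bids ((lo + hi) / 2) hi hmid2 hlen]
        have hsplit : (bids.drop lo).take (hi - lo)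
            = (bids.drop lo).take ((lo + hi) / 2 - lo)
              ++ (bids.drop ((lo + hi) / 2)).take (hi - (lo + hi) / 2) := by
          have h2 : hi - lo = ((lo + hi) / 2 - lo) + (hi - (lo + hi) / 2) := by omega
          rw [h2, List.take_add, List.drop_drop]
          have h3 : lo + ((lo + hi) / 2 - lo) = (lo + hi) / 2 := by omega
          rw [h3]
        rw [hsplit, List.flatMap_append, rs_ofList_append]
        rfl

-- ===== VERDICT (by name: the statement is the Claim_ definition above) =====
theorem resolve_sources_spec : Claim_equal_resolve_sources := by
  intro bullet_ids lookup _
  unfold Spec_resolve_sources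
  set g : String → List String := fun bid =>
    if (PySem.Dict.mk lookup).contains bid then
      PySem.Dict.getD (PySem.Dict.mk (((PySem.Dict.mk lookup).get? bid).getD [])) "source" []
    else [] with hgdef
  have hg : ∀ bid, (if (PySem.Dict.mk lookup).contains bid then
      PySem.Dict.getD (PySem.Dict.mk (((PySem.Dict.mk lookup).get? bid).getD [])) "source" []
    else []) = g bid := fun bid => rfl
  have halt : resolve_sources_alt bullet_ids lookup
      = PySem.Set.ofList (bullet_ids.flatMap g) := by
    unfold resolve_sources_alt
    rw [rs_solve_eq g lookup hg bullet_ids.length bullet_ids 0 bullet_ids.length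
      (by omega) (Nat.le_refl _)]
    simp
  rw [halt]
  unfold resolve_sources
  have hA : (fun (st : List String × PySem.Set String) bid =>
        if (PySem.Dict.mk lookup).contains bid = false then st
        else
          (PySem.Dict.getD (PySem.Dict.mk (((PySem.Dict.mk lookup).get? bid).getD [])) "source" []).foldl
            (fun (st : List String × PySem.Set String) src =>
              if PySem.Set.contains st.2 src then st
              else (st.1 ++ [src], PySem.Set.add st.2 src)) st)
      = (fun (st : List String × PySem.Set String) bid =>
        (g bid).foldl (fun (st : List String × PySem.Set String) src =>
          if PySem.Set.contains st.2 src then st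
          else (st.1 ++ [src], PySem.Set.add st.2 src)) st) := by
    funext st bid
    rw [hgdef]
    by_cases h : (PySem.Dict.mk lookup).contains bid
    · simp [h]
    · simp [h]
  rw [hA]
  have hinit : (([], PySem.Set.empty) : List String × PySem.Set String)
      = ((PySem.Set.empty : PySem.Set String), (PySem.Set.empty : PySem.Set String)) := rfl
  rw [hinit, rs_outerA]
  show bullet_ids.foldl (fun s bid => (g bid).foldl PySem.Set.add s) PySem.Set.empty
      = PySem.Set.ofList (bullet_ids.flatMap g)
  have hfl := rs_flatten g bullet_ids [] PySem.Set.empty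
  rw [List.foldl_nil] at hfl
  rw [← hfl, rs_foldl_append_eq_flatMap, List.nil_append, PySem.Set.ofList_eq_foldl]
  rfl
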